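-- pv_equiv track=rewrite | github.com/sertaac/The-Low-Level-Cryptography-Binary-Security-Lab | 2 - 3 Difficulty/hacktooth's KeygenMe again (LINUX)/keygen.py | generate_serial
-- ===== SOURCE A (Python) =====
-- SEED_BYTES = [0x37, 0x6B, 0x4C, 0xAC]
--
-- def generate_serial(username: str) -> str:
--     """
--     Generates a valid serial key for the given username based on the reversed algorithm.
--
--     Algorithm Summary:
--     1. Initialize a 4-byte accumulator with zeros.
--     2. XOR each character of the username into the accumulator (cycling index % 4).
--     3. XOR the final accumulator with the hardcoded Seed Bytes.
--     4. Convert the result to an Uppercase Hex String.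
--     """
--
--     # Handle edge case: empty username returns the raw seed (as seen in disassembly)
--     if not username:
--         return "AC4C6B37"
--
--     # Initialize a 4-byte buffer (accumulator)
--     accumulator = [0, 0, 0, 0]
--
--     # Process the username string
--     for i, char in enumerate(username):
--         # XOR the ASCII value of the character with the accumulator.
--         # The index wraps around every 4 bytes (equivalent to 'i & 3' in C).
--         accumulator[i % 4] ^= ord(char)
--
--     # Final Stage: XOR with the Seed
--     final_bytes = []
--     for i in range(4):
--         # XOR the user-derived byte with the corresponding seed byte
--         val = accumulator[i] ^ SEED_BYTES[i]
--         final_bytes.append(val)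
--
--     # Format the result as a Hexadecimal string (e.g., "A1B2C3D4")
--     serial_key = "".join(f"{b:02X}" for b in final_bytes)
--
--     return serial_key
-- ===== SOURCE B (Python) =====
-- SEED_BYTES = [0x37, 0x6B, 0x4C, 0xAC]
--
-- def generate_serial(username: str) -> str:
--     # Empty username: the disassembly's fixed serial.
--     if not username:
--         return "AC4C6B37"
--     # Word-at-a-time: pack the bytes into little-endian 32-bit words, XOR all
--     # words together with the seed word 0xAC4C6B37, then hex-dump the word's
--     # bytes in little-endian order.
--     data = username.encode('ascii')
--     word = 0xAC4C6B37
--     for k in range(0, len(data), 4):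
--         word ^= int.from_bytes(data[k:k+4], 'little')
--     return word.to_bytes(4, 'little').hex().upper()
-- ===== Notes on version B (the rewrite author's own statement) =====
-- stated objective: alternative
-- what changed: Replaces A's per-character i%4 accumulator list plus a separate seed pass and a per-byte format join with word-at-a-time processing: pack the string into little-endian 32-bit words, XOR all words into the single seed word 0xAC4C6B37, and hex-dump the word's four bytes.
import Mathlib
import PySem

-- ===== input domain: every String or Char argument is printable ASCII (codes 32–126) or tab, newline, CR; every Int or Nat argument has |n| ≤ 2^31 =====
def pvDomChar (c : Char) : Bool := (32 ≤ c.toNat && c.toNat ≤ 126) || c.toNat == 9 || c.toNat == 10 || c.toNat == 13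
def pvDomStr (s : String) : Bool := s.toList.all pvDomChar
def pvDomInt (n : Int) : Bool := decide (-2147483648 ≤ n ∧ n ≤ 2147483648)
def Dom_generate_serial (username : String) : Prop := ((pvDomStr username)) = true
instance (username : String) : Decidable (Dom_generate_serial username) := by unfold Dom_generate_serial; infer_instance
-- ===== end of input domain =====

-- B keeps A's return value but works word-at-a-time: it packs the string into little-endian
-- 32-bit words, XORs them all into the seed word 0xAC4C6B37, and hex-dumps the word's four
-- bytes, instead of A's per-character i%4 accumulator list, seed pass and per-byte join
-- (objective: alternative).

-- ===== PORT A =====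

-- shared helper: Python's f"{b:02X}" — exact for 0 ≤ b (every value formatted here is a xor of char codes and seeds, hence nonnegative)
def pvHexChar (n : Nat) : Char :=
  if n < 10 then Char.ofNat (48 + n) else Char.ofNat (55 + n)

def pvHexDigits (n : Nat) : List Char :=
  if _h : n < 16 then [pvHexChar n]
  else pvHexDigits (n / 16) ++ [pvHexChar (n % 16)]
termination_by n
decreasing_by exact Nat.div_lt_self (by omega) (by norm_num)

def pvHex2 (b : Int) : List Char :=
  let ds := pvHexDigits b.toNat
  List.replicate (2 - ds.length) '0' ++ ds

def pvSeedBytes : List Int := [0x37, 0x6B, 0x4C, 0xAC]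

def generate_serial (username : String) : String :=
  if username.toList = [] then "AC4C6B37"
  else
    -- accumulator[i % 4] ^= ord(char)  (index i ≥ 0 from enumerate, so .toNat is exact)
    let accumulator : List Int :=
      (PySem.List.enumerate username.toList).foldl
        (fun acc ic =>
          acc.set (PySem.Int.mod ic.1 4).toNat
            (PySem.Int.bxor (PySem.List.pyGetD acc (PySem.Int.mod ic.1 4) 0) ((ic.2.toNat : Int))))
        [0, 0, 0, 0]
    let final_bytes : List Int :=
      (PySem.List.pyRange 0 4).foldl
        (fun fb i =>
          fb ++ [PySem.Int.bxor (PySem.List.pyGetD accumulator i 0) (PySem.List.pyGetD pvSeedBytes i 0)])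
        []
    String.ofList (final_bytes.foldl (fun s b => s ++ pvHex2 b) [])

-- ===== PORT B =====

-- int.from_bytes(data[k:k+4], 'little') — exact for a chunk of at most 4 bytes (missing bytes read as 0)
def pvPack4 (l : List Nat) : Nat :=
  l.getD 0 0 + 256 * l.getD 1 0 + 65536 * l.getD 2 0 + 16777216 * l.getD 3 0

-- the 'for k in range(0, len(data), 4): word ^= int.from_bytes(data[k:k+4], "little")' loop of Source B
def pvWordFold (l : List Nat) (w : Nat) : Nat :=
  if h : l = [] then w
  else pvWordFold (l.drop 4) (w ^^^ pvPack4 (l.take 4))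
termination_by l.length
decreasing_by
  simp only [List.length_drop]
  have : 0 < l.length := List.length_pos_of_ne_nil h
  omega

-- one byte of bytes.hex().upper(): two uppercase hex digits (exact for byte values < 256)
def pvByteHex (b : Nat) : List Char := [pvHexChar (b / 16 % 16), pvHexChar (b % 16)]

def generate_serial_alt (username : String) : String :=
  if username.toList = [] then "AC4C6B37"
  else
    -- username.encode('ascii'): on the ASCII domain the byte values are the code points
    let data := username.toList.map Char.toNat
    let w := pvWordFold data 0xAC4C6B37
    -- word.to_bytes(4, 'little').hex().upper(): the four little-endian bytes of w, hex-dumped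
    String.ofList (pvByteHex (w % 256) ++ pvByteHex (w / 256 % 256) ++
                   pvByteHex (w / 65536 % 256) ++ pvByteHex (w / 16777216 % 256))

-- ===== PRECONDITION & SPEC =====
def Spec_generate_serial (username : String) (out : String) : Prop := out = generate_serial_alt username
instance (username : String) (out : String) : Decidable (Spec_generate_serial username out) := by unfold Spec_generate_serial; infer_instance

-- ===== CLAIM (what is proved, stated in full; the proofs are below) =====
def Claim_equal_generate_serial : Prop := ∀ (username : String), Dom_generate_serial username → Spec_generate_serial username (generate_serial username)

-- ===== LEMMAS AND PROOFS =====
set_option maxRecDepth 8192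

-- xor (as Nat) of the codes of the characters at positions p of the list with (i + p) % 4 = j
def pvX (i j : Int) : List Char → Nat
  | [] => 0
  | ch :: rest => (if i % 4 = j then ch.toNat else 0) ^^^ pvX (i + 1) j rest

theorem pvX_add_four (l : List Char) : ∀ (i j : Int), pvX (i + 4) j l = pvX i j l := by
  induction l with
  | nil => intro i j; rfl
  | cons ch rest ih =>
      intro i j
      show (if (i + 4) % 4 = j then ch.toNat else 0) ^^^ pvX (i + 4 + 1) j rest
         = (if i % 4 = j then ch.toNat else 0) ^^^ pvX (i + 1) j rest
      have h4 : (i + 4) % 4 = i % 4 := by omega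
      have h1 : i + 4 + 1 = i + 1 + 4 := by ring
      rw [h4, h1, ih]

-- A's loop: starting the enumeration at index i with accumulator [a0, a1, a2, a3], lane j ends as aj ^^^ pvX i j l
theorem pvA_fold (l : List Char) : ∀ (i : Int), 0 ≤ i → ∀ (a0 a1 a2 a3 : Nat),
    (PySem.List.enumerate l i).foldl
        (fun acc ic =>
          acc.set (PySem.Int.mod ic.1 4).toNat
            (PySem.Int.bxor (PySem.List.pyGetD acc (PySem.Int.mod ic.1 4) 0) ((ic.2.toNat : Int))))
        [(a0 : Int), (a1 : Int), (a2 : Int), (a3 : Int)]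
      = [((a0 ^^^ pvX i 0 l : Nat) : Int), ((a1 ^^^ pvX i 1 l : Nat) : Int),
         ((a2 ^^^ pvX i 2 l : Nat) : Int), ((a3 ^^^ pvX i 3 l : Nat) : Int)] := by
  induction l with
  | nil => intro i _ a0 a1 a2 a3; simp [PySem.List.enumerate, pvX]
  | cons ch rest ih =>
      intro i hi a0 a1 a2 a3
      have hmod : PySem.Int.mod i 4 = i % 4 := PySem.Int.mod_eq_emod_of_pos (by norm_num)
      have h4 : i % 4 = 0 ∨ i % 4 = 1 ∨ i % 4 = 2 ∨ i % 4 = 3 := by omega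
      rw [show PySem.List.enumerate (ch :: rest) i = (i, ch) :: PySem.List.enumerate rest (i + 1) from rfl]
      rw [List.foldl_cons]
      rcases h4 with h | h | h | h
      · have hstep : (fun (acc : List Int) (ic : Int × Char) =>
              acc.set (PySem.Int.mod ic.1 4).toNat
                (PySem.Int.bxor (PySem.List.pyGetD acc (PySem.Int.mod ic.1 4) 0) ((ic.2.toNat : Int))))
              [(a0 : Int), (a1 : Int), (a2 : Int), (a3 : Int)] (i, ch)
            = [((a0 ^^^ ch.toNat : Nat) : Int), (a1 : Int), (a2 : Int), (a3 : Int)] := by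
          simp [hmod, h, PySem.List.pyGetD, PySem.List.pyGet?, PySem.List.pyIdx?, PySem.Int.bxor_natCast]
        simp only [hstep]
        rw [ih (i + 1) (by omega)]
        have e0 : pvX i 0 (ch :: rest) = (if i % 4 = 0 then ch.toNat else 0) ^^^ pvX (i + 1) 0 rest := rfl
        have e1 : pvX i 1 (ch :: rest) = (if i % 4 = 1 then ch.toNat else 0) ^^^ pvX (i + 1) 1 rest := rfl
        have e2 : pvX i 2 (ch :: rest) = (if i % 4 = 2 then ch.toNat else 0) ^^^ pvX (i + 1) 2 rest := rfl
        have e3 : pvX i 3 (ch :: rest) = (if i % 4 = 3 then ch.toNat else 0) ^^^ pvX (i + 1) 3 rest := rfl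
        simp [e0, e1, e2, e3, h, Nat.xor_assoc]
      · have hstep : (fun (acc : List Int) (ic : Int × Char) =>
              acc.set (PySem.Int.mod ic.1 4).toNat
                (PySem.Int.bxor (PySem.List.pyGetD acc (PySem.Int.mod ic.1 4) 0) ((ic.2.toNat : Int))))
              [(a0 : Int), (a1 : Int), (a2 : Int), (a3 : Int)] (i, ch)
            = [(a0 : Int), ((a1 ^^^ ch.toNat : Nat) : Int), (a2 : Int), (a3 : Int)] := by
          simp [hmod, h, PySem.List.pyGetD, PySem.List.pyGet?, PySem.List.pyIdx?, PySem.Int.bxor_natCast]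
        simp only [hstep]
        rw [ih (i + 1) (by omega)]
        have e0 : pvX i 0 (ch :: rest) = (if i % 4 = 0 then ch.toNat else 0) ^^^ pvX (i + 1) 0 rest := rfl
        have e1 : pvX i 1 (ch :: rest) = (if i % 4 = 1 then ch.toNat else 0) ^^^ pvX (i + 1) 1 rest := rfl
        have e2 : pvX i 2 (ch :: rest) = (if i % 4 = 2 then ch.toNat else 0) ^^^ pvX (i + 1) 2 rest := rfl
        have e3 : pvX i 3 (ch :: rest) = (if i % 4 = 3 then ch.toNat else 0) ^^^ pvX (i + 1) 3 rest := rfl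
        simp [e0, e1, e2, e3, h, Nat.xor_assoc]
      · have hstep : (fun (acc : List Int) (ic : Int × Char) =>
              acc.set (PySem.Int.mod ic.1 4).toNat
                (PySem.Int.bxor (PySem.List.pyGetD acc (PySem.Int.mod ic.1 4) 0) ((ic.2.toNat : Int))))
              [(a0 : Int), (a1 : Int), (a2 : Int), (a3 : Int)] (i, ch)
            = [(a0 : Int), (a1 : Int), ((a2 ^^^ ch.toNat : Nat) : Int), (a3 : Int)] := by
          simp [hmod, h, PySem.List.pyGetD, PySem.List.pyGet?, PySem.List.pyIdx?, PySem.Int.bxor_natCast]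
        simp only [hstep]
        rw [ih (i + 1) (by omega)]
        have e0 : pvX i 0 (ch :: rest) = (if i % 4 = 0 then ch.toNat else 0) ^^^ pvX (i + 1) 0 rest := rfl
        have e1 : pvX i 1 (ch :: rest) = (if i % 4 = 1 then ch.toNat else 0) ^^^ pvX (i + 1) 1 rest := rfl
        have e2 : pvX i 2 (ch :: rest) = (if i % 4 = 2 then ch.toNat else 0) ^^^ pvX (i + 1) 2 rest := rfl
        have e3 : pvX i 3 (ch :: rest) = (if i % 4 = 3 then ch.toNat else 0) ^^^ pvX (i + 1) 3 rest := rfl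
        simp [e0, e1, e2, e3, h, Nat.xor_assoc]
      · have hstep : (fun (acc : List Int) (ic : Int × Char) =>
              acc.set (PySem.Int.mod ic.1 4).toNat
                (PySem.Int.bxor (PySem.List.pyGetD acc (PySem.Int.mod ic.1 4) 0) ((ic.2.toNat : Int))))
              [(a0 : Int), (a1 : Int), (a2 : Int), (a3 : Int)] (i, ch)
            = [(a0 : Int), (a1 : Int), (a2 : Int), ((a3 ^^^ ch.toNat : Nat) : Int)] := by
          simp [hmod, h, PySem.List.pyGetD, PySem.List.pyGet?, PySem.List.pyIdx?, PySem.Int.bxor_natCast]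
        simp only [hstep]
        rw [ih (i + 1) (by omega)]
        have e0 : pvX i 0 (ch :: rest) = (if i % 4 = 0 then ch.toNat else 0) ^^^ pvX (i + 1) 0 rest := rfl
        have e1 : pvX i 1 (ch :: rest) = (if i % 4 = 1 then ch.toNat else 0) ^^^ pvX (i + 1) 1 rest := rfl
        have e2 : pvX i 2 (ch :: rest) = (if i % 4 = 2 then ch.toNat else 0) ^^^ pvX (i + 1) 2 rest := rfl
        have e3 : pvX i 3 (ch :: rest) = (if i % 4 = 3 then ch.toNat else 0) ^^^ pvX (i + 1) 3 rest := rfl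
        simp [e0, e1, e2, e3, h, Nat.xor_assoc]

-- xor of two byte-bounded values is byte-bounded
theorem pvXorLt {x y : Nat} (hx : x < 256) (hy : y < 256) : x ^^^ y < 256 :=
  Nat.xor_lt_two_pow (n := 8) hx hy

-- xor acts digit-wise on a base-256 decomposition
theorem pvXorSplit (x x' y y' : Nat) (hx : x < 256) (hx' : x' < 256) :
    (x + 256 * y) ^^^ (x' + 256 * y') = (x ^^^ x') + 256 * (y ^^^ y') := by
  apply Nat.eq_of_testBit_eq
  intro j
  have e : ∀ u v : Nat, u + 256 * v = 2 ^ 8 * v + u := by intro u v; ring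
  rw [Nat.testBit_xor, e x y, e x' y', e (x ^^^ x') (y ^^^ y'),
      Nat.testBit_two_pow_mul_add _ hx, Nat.testBit_two_pow_mul_add _ hx',
      Nat.testBit_two_pow_mul_add _ (pvXorLt hx hx')]
  by_cases hj : j < 8
  · simp [hj, Nat.testBit_xor]
  · simp [hj, Nat.testBit_xor]

theorem pvXorSplit4 (a b c d a' b' c' d' : Nat)
    (ha : a < 256) (hb : b < 256) (hc : c < 256)
    (ha' : a' < 256) (hb' : b' < 256) (hc' : c' < 256) :
    (a + 256 * b + 65536 * c + 16777216 * d) ^^^ (a' + 256 * b' + 65536 * c' + 16777216 * d')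
      = (a ^^^ a') + 256 * (b ^^^ b') + 65536 * (c ^^^ c') + 16777216 * (d ^^^ d') := by
  have h1 : a + 256 * b + 65536 * c + 16777216 * d = a + 256 * (b + 256 * (c + 256 * d)) := by ring
  have h2 : a' + 256 * b' + 65536 * c' + 16777216 * d' = a' + 256 * (b' + 256 * (c' + 256 * d')) := by ring
  rw [h1, h2, pvXorSplit _ _ _ _ ha ha', pvXorSplit _ _ _ _ hb hb', pvXorSplit _ _ _ _ hc hc']
  ring

-- each lane xor is byte-bounded when the codes are
theorem pvX_lt (l : List Char) (hl : ∀ ch ∈ l, ch.toNat < 256) :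
    ∀ (i j : Int), pvX i j l < 256 := by
  induction l with
  | nil => intro i j; simp [pvX]
  | cons ch rest ih =>
      intro i j
      have hch : ch.toNat < 256 := hl ch (by simp)
      have hrest : pvX (i + 1) j rest < 256 := ih (fun c hc => hl c (by simp [hc])) (i + 1) j
      show (if i % 4 = j then ch.toNat else 0) ^^^ pvX (i + 1) j rest < 256
      by_cases h : i % 4 = j
      · simpa [h] using pvXorLt hch hrest
      · simpa [h] using hrest

-- unfolding equations for B's word loop
theorem pvWordFold_nil (w : Nat) : pvWordFold [] w = w := by
  rw [pvWordFold]; simp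

theorem pvWordFold_cons (l : List Nat) (h : l ≠ []) (w : Nat) :
    pvWordFold l w = pvWordFold (l.drop 4) (w ^^^ pvPack4 (l.take 4)) := by
  rw [pvWordFold]; simp [h]

-- B's word loop computes the four seed-xored lanes, packed little-endian
theorem pvWordFold_lanes : ∀ (l : List Char), (∀ ch ∈ l, ch.toNat < 256) →
    ∀ (a b c d : Nat), a < 256 → b < 256 → c < 256 → d < 256 →
    pvWordFold (l.map Char.toNat) (a + 256 * b + 65536 * c + 16777216 * d)
      = (a ^^^ pvX 0 0 l) + 256 * (b ^^^ pvX 0 1 l)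
        + 65536 * (c ^^^ pvX 0 2 l) + 16777216 * (d ^^^ pvX 0 3 l) := by
  intro l
  induction hn : l.length using Nat.strong_induction_on generalizing l with
  | _ n ihn =>
  intro hl a b c d ha hb hc hd
  match l, hn with
  | [], _ => simp [pvWordFold_nil, pvX]
  | [c0], _ =>
      have h0 : c0.toNat < 256 := hl c0 (by simp)
      rw [show List.map Char.toNat [c0] = [c0.toNat] from rfl,
          pvWordFold_cons _ (by simp),
          show ([c0.toNat] : List Nat).drop 4 = [] from rfl,
          show ([c0.toNat] : List Nat).take 4 = [c0.toNat] from rfl,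
          pvWordFold_nil,
          show pvPack4 [c0.toNat] = c0.toNat + 256 * 0 + 65536 * 0 + 16777216 * 0 by simp [pvPack4],
          pvXorSplit4 a b c d c0.toNat 0 0 0 ha hb hc h0 (by norm_num) (by norm_num)]
      simp [pvX]
  | [c0, c1], _ =>
      have h0 : c0.toNat < 256 := hl c0 (by simp)
      have h1 : c1.toNat < 256 := hl c1 (by simp)
      rw [show List.map Char.toNat [c0, c1] = [c0.toNat, c1.toNat] from rfl,
          pvWordFold_cons _ (by simp),
          show ([c0.toNat, c1.toNat] : List Nat).drop 4 = [] from rfl,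
          show ([c0.toNat, c1.toNat] : List Nat).take 4 = [c0.toNat, c1.toNat] from rfl,
          pvWordFold_nil,
          show pvPack4 [c0.toNat, c1.toNat]
            = c0.toNat + 256 * c1.toNat + 65536 * 0 + 16777216 * 0 by simp [pvPack4],
          pvXorSplit4 a b c d c0.toNat c1.toNat 0 0 ha hb hc h0 h1 (by norm_num)]
      simp [pvX]
  | [c0, c1, c2], _ =>
      have h0 : c0.toNat < 256 := hl c0 (by simp)
      have h1 : c1.toNat < 256 := hl c1 (by simp)
      have h2 : c2.toNat < 256 := hl c2 (by simp)
      rw [show List.map Char.toNat [c0, c1, c2] = [c0.toNat, c1.toNat, c2.toNat] from rfl,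
          pvWordFold_cons _ (by simp),
          show ([c0.toNat, c1.toNat, c2.toNat] : List Nat).drop 4 = [] from rfl,
          show ([c0.toNat, c1.toNat, c2.toNat] : List Nat).take 4 = [c0.toNat, c1.toNat, c2.toNat] from rfl,
          pvWordFold_nil,
          show pvPack4 [c0.toNat, c1.toNat, c2.toNat]
            = c0.toNat + 256 * c1.toNat + 65536 * c2.toNat + 16777216 * 0 by simp [pvPack4],
          pvXorSplit4 a b c d c0.toNat c1.toNat c2.toNat 0 ha hb hc h0 h1 h2]
      simp [pvX]
  | c0 :: c1 :: c2 :: c3 :: rest, hn =>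
      have h0 : c0.toNat < 256 := hl c0 (by simp)
      have h1 : c1.toNat < 256 := hl c1 (by simp)
      have h2 : c2.toNat < 256 := hl c2 (by simp)
      have h3 : c3.toNat < 256 := hl c3 (by simp)
      have hrest : ∀ ch ∈ rest, ch.toNat < 256 := fun ch hc => hl ch (by simp [hc])
      rw [show List.map Char.toNat (c0 :: c1 :: c2 :: c3 :: rest)
            = c0.toNat :: c1.toNat :: c2.toNat :: c3.toNat :: rest.map Char.toNat from rfl,
          pvWordFold_cons _ (by simp),
          show (c0.toNat :: c1.toNat :: c2.toNat :: c3.toNat :: rest.map Char.toNat : List Nat).drop 4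
            = rest.map Char.toNat from rfl,
          show (c0.toNat :: c1.toNat :: c2.toNat :: c3.toNat :: rest.map Char.toNat : List Nat).take 4
            = [c0.toNat, c1.toNat, c2.toNat, c3.toNat] from rfl,
          show pvPack4 [c0.toNat, c1.toNat, c2.toNat, c3.toNat]
            = c0.toNat + 256 * c1.toNat + 65536 * c2.toNat + 16777216 * c3.toNat by simp [pvPack4],
          pvXorSplit4 a b c d c0.toNat c1.toNat c2.toNat c3.toNat ha hb hc h0 h1 h2,
          ihn rest.length (by simp at hn; omega) rest rfl hrest _ _ _ _
            (pvXorLt ha h0) (pvXorLt hb h1) (pvXorLt hc h2) (pvXorLt hd h3)]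
      have ex : ∀ j : Int, pvX 0 j (c0 :: c1 :: c2 :: c3 :: rest)
          = (if (0:Int) % 4 = j then c0.toNat else 0)
            ^^^ ((if (1:Int) % 4 = j then c1.toNat else 0)
            ^^^ ((if (2:Int) % 4 = j then c2.toNat else 0)
            ^^^ ((if (3:Int) % 4 = j then c3.toNat else 0) ^^^ pvX 4 j rest))) := by
        intro j; rfl
      have hx4 : ∀ j : Int, pvX 4 j rest = pvX 0 j rest := by
        intro j; have := pvX_add_four rest 0 j; simpa using this
      rw [ex 0, ex 1, ex 2, ex 3, hx4 0, hx4 1, hx4 2, hx4 3]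
      norm_num [Nat.xor_assoc]

-- Python's f"{b:02X}" and the per-byte hex dump agree on byte values
theorem pvHex2_eq_byteHex (n : Nat) (hn : n < 256) : pvHex2 ((n : Nat) : Int) = pvByteHex n := by
  unfold pvHex2 pvByteHex
  simp only [Int.toNat_natCast]
  by_cases h : n < 16
  · rw [pvHexDigits]
    simp only [h, reduceDIte]
    have hdiv : n / 16 = 0 := by omega
    have hmod : n % 16 = n := by omega
    simp [hdiv, hmod, List.replicate, pvHexChar]
  · rw [pvHexDigits]
    simp only [h, reduceDIte]
    rw [pvHexDigits]
    have hlt : n / 16 < 16 := by omega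
    simp only [hlt, reduceDIte]
    have hdm : n / 16 % 16 = n / 16 := by omega
    simp [hdm, List.replicate]

-- ===== VERDICT (by name: the statement is the Claim_ definition above) =====
theorem generate_serial_spec : Claim_equal_generate_serial := by
  intro username hdom
  unfold Spec_generate_serial generate_serial generate_serial_alt
  by_cases h : username.toList = []
  · simp [h]
  · simp only [h, if_false]
    have hcodes : ∀ ch ∈ username.toList, ch.toNat < 256 := by
      intro ch hc
      have := List.all_eq_true.mp hdom ch hc
      simp only [pvDomChar, Bool.or_eq_true, Bool.and_eq_true, decide_eq_true_eq, beq_iff_eq] at this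
      omega
    have hA := pvA_fold username.toList 0 (le_refl 0) 0 0 0 0
    simp only [Nat.cast_zero] at hA
    rw [hA]
    -- B's word
    have hW := pvWordFold_lanes username.toList hcodes 0x37 0x6B 0x4C 0xAC
      (by norm_num) (by norm_num) (by norm_num) (by norm_num)
    have hseed : (0x37 : Nat) + 256 * 0x6B + 65536 * 0x4C + 16777216 * 0xAC = 0xAC4C6B37 := by norm_num
    rw [hseed] at hW
    rw [hW]
    set X0 := pvX 0 0 username.toList with hX0
    set X1 := pvX 0 1 username.toList with hX1
    set X2 := pvX 0 2 username.toList with hX2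
    set X3 := pvX 0 3 username.toList with hX3
    have b0 : (0x37 : Nat) ^^^ X0 < 256 := pvXorLt (by norm_num) (pvX_lt _ hcodes 0 0)
    have b1 : (0x6B : Nat) ^^^ X1 < 256 := pvXorLt (by norm_num) (pvX_lt _ hcodes 0 1)
    have b2 : (0x4C : Nat) ^^^ X2 < 256 := pvXorLt (by norm_num) (pvX_lt _ hcodes 0 2)
    have b3 : (0xAC : Nat) ^^^ X3 < 256 := pvXorLt (by norm_num) (pvX_lt _ hcodes 0 3)
    set v0 := (0x37 : Nat) ^^^ X0
    set v1 := (0x6B : Nat) ^^^ X1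
    set v2 := (0x4C : Nat) ^^^ X2
    set v3 := (0xAC : Nat) ^^^ X3
    -- byte extraction from the packed word
    have e0 : (v0 + 256 * v1 + 65536 * v2 + 16777216 * v3) % 256 = v0 := by omega
    have e1 : (v0 + 256 * v1 + 65536 * v2 + 16777216 * v3) / 256 % 256 = v1 := by omega
    have e2 : (v0 + 256 * v1 + 65536 * v2 + 16777216 * v3) / 65536 % 256 = v2 := by omega
    have e3 : (v0 + 256 * v1 + 65536 * v2 + 16777216 * v3) / 16777216 % 256 = v3 := by omega
    rw [e0, e1, e2, e3]
    -- A's final pass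
    have hr : PySem.List.pyRange 0 4 = [0, 1, 2, 3] := by decide
    rw [hr]
    simp only [List.foldl_cons, List.foldl_nil]
    norm_num [pvSeedBytes, PySem.List.pyGetD, PySem.List.pyGet?, PySem.List.pyIdx?,
      List.getElem_cons_zero, List.getElem_cons_succ]
    simp only [show Int.toNat 2 = 2 from rfl, show Int.toNat 3 = 3 from rfl]
    norm_num
    have hbx : ∀ (x : Nat) (s : Int), 0 ≤ s → PySem.Int.bxor (↑x) s = ((s.toNat ^^^ x : Nat) : Int) := by
      intro x s hs
      rw [PySem.Int.bxor_of_nonneg (Int.natCast_nonneg x) hs]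
      simp [Nat.xor_comm]
    rw [hbx _ 55 (by norm_num), hbx _ 107 (by norm_num), hbx _ 76 (by norm_num), hbx _ 172 (by norm_num)]
    simp only [show Int.toNat 55 = 55 from rfl, show Int.toNat 107 = 107 from rfl,
      show Int.toNat 76 = 76 from rfl, show Int.toNat 172 = 172 from rfl]
    rw [show (55 : Nat) ^^^ X0 = v0 from rfl, show (107 : Nat) ^^^ X1 = v1 from rfl,
        show (76 : Nat) ^^^ X2 = v2 from rfl, show (172 : Nat) ^^^ X3 = v3 from rfl]
    rw [pvHex2_eq_byteHex v0 b0, pvHex2_eq_byteHex v1 b1, pvHex2_eq_byteHex v2 b2,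
        pvHex2_eq_byteHex v3 b3]
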